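-- pv_equiv track=rewrite | github.com/warninghejo-blip/identity-prism | twitter-bot-python/utils.py | trim_hashtags
-- ===== SOURCE A (Python) =====
-- def trim_hashtags(text, max_tags):
--     if not text:
--         return ''
--     tags = [token for token in text.split() if token.startswith('#')]
--     if len(tags) <= max_tags:
--         return text
--     kept = []
--     kept_count = 0
--     for token in text.split():
--         if token.startswith('#'):
--             if kept_count < max_tags:
--                 kept.append(token)
--                 kept_count += 1
--             continue
--         kept.append(token)
--     return ' '.join(kept).strip()
-- ===== SOURCE B (Python) =====
-- def trim_hashtags(text, max_tags):
--     tokens = text.split()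
--     total = sum(t.startswith('#') for t in tokens)
--     if total <= max_tags:
--         return text
--     excess = total - max(max_tags, 0)
--     out = []
--     for t in reversed(tokens):
--         if excess and t.startswith('#'):
--             excess -= 1
--         else:
--             out.append(t)
--     return ' '.join(reversed(out))
-- ===== Notes on version B (the rewrite author's own statement) =====
-- stated objective: alternative
-- what changed: B counts hashtags once, then builds the output BACK-TO-FRONT: it walks the tokens in reverse, dropping the trailing excess hashtags while the excess counter runs down, and reverses the collected list for the join, instead of A's forward rescan that keeps the first k hashtags with a running kept counter (and A's redundant final strip).
import Mathlib
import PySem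

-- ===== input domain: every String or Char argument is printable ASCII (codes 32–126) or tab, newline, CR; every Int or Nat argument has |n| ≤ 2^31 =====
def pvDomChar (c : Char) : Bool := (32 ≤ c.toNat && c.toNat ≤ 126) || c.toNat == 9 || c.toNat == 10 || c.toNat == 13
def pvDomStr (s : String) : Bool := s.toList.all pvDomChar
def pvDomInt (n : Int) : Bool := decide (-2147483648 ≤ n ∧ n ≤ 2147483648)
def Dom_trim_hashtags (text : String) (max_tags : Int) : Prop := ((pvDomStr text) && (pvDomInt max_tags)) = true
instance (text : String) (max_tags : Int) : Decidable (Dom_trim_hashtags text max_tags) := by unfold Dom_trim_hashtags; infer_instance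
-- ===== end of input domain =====

-- B counts hashtags once, then builds the output back-to-front: a reverse walk drops
-- the trailing excess hashtags, and the collected list is reversed for the join
-- (objective: alternative decomposition, same complexity).

-- ===== PORT A =====
def trim_hashtags (text : String) (max_tags : Int) : String :=
  if text = "" then ""
  else
    let tags := (PySem.Str.split₀ text).filter (fun token => PySem.Str.startswith token "#")
    if (tags.length : Int) ≤ max_tags then text
    else
      let st := (PySem.Str.split₀ text).foldl
        (fun (s : List String × Int) token =>
          if PySem.Str.startswith token "#" then
            if s.2 < max_tags then (s.1 ++ [token], s.2 + 1) else s
          else (s.1 ++ [token], s.2)) ([], 0)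
      PySem.Str.strip (PySem.Str.join " " st.1)

-- ===== PORT B =====
def trim_hashtags_alt (text : String) (max_tags : Int) : String :=
  let tokens := PySem.Str.split₀ text
  let total : Int := tokens.foldl
    (fun acc t => acc + (if PySem.Str.startswith t "#" then 1 else 0)) 0
  if total ≤ max_tags then text
  else
    let excess := total - max max_tags 0
    let r := tokens.reverse.foldl
      (fun (s : Int × List String) t =>
        if s.1 ≠ 0 ∧ PySem.Str.startswith t "#" = true then (s.1 - 1, s.2)
        else (s.1, s.2 ++ [t])) (excess, [])
    PySem.Str.join " " r.2.reverse

-- ===== PRECONDITION & SPEC =====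
def Spec_trim_hashtags (text : String) (max_tags : Int) (out : String) : Prop := out = trim_hashtags_alt text max_tags
instance (text : String) (max_tags : Int) (out : String) : Decidable (Spec_trim_hashtags text max_tags out) := by unfold Spec_trim_hashtags; infer_instance

-- ===== CLAIM (what is proved, stated in full; the proofs are below) =====
def Claim_equal_trim_hashtags : Prop := ∀ (text : String) (max_tags : Int), Dom_trim_hashtags text max_tags → Spec_trim_hashtags text max_tags (trim_hashtags text max_tags)

-- ===== LEMMAS AND PROOFS =====

-- a token is a hashtag token
def pvIsTag (t : String) : Bool := PySem.Str.startswith t "#"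

-- number of hashtag tokens
def pvCnt (ts : List String) : Nat := (ts.filter pvIsTag).length

-- the intended result on the token list: keep the first n hashtag tokens, every other token
def pvKeep (ts : List String) (n : Nat) : List String :=
  match ts, n with
  | [], _ => []
  | t :: ts, n =>
    if pvIsTag t then
      match n with
      | 0 => pvKeep ts 0
      | n + 1 => t :: pvKeep ts n
    else t :: pvKeep ts n

theorem pvCnt_snoc (ts : List String) (t : String) :
    pvCnt (ts ++ [t]) = pvCnt ts + (if pvIsTag t then 1 else 0) := by
  simp [pvCnt, List.filter_append, List.filter]
  split <;> simp_all

-- big enough budget keeps everything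
theorem pvKeep_all (ts : List String) (n : Nat) (h : pvCnt ts ≤ n) : pvKeep ts n = ts := by
  induction ts generalizing n with
  | nil => simp [pvKeep]
  | cons t ts ih =>
    by_cases ht : pvIsTag t = true
    · have hc : pvCnt (t :: ts) = pvCnt ts + 1 := by simp [pvCnt, List.filter, ht]
      cases n with
      | zero => omega
      | succ n => simp [pvKeep, ht, ih n (by omega)]
    · have hc : pvCnt (t :: ts) = pvCnt ts := by simp [pvCnt, List.filter, ht]
      simp [pvKeep, ht, ih n (by omega)]

-- keeping over a snoc: the last token survives iff it is not a tag or the budget is not used up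
theorem pvKeep_snoc (ts : List String) (t : String) (n : Nat) :
    pvKeep (ts ++ [t]) n
      = pvKeep ts n ++ (if pvIsTag t then (if pvCnt ts < n then [t] else []) else [t]) := by
  induction ts generalizing n with
  | nil =>
    by_cases ht : pvIsTag t = true
    · cases n with
      | zero => simp [pvKeep, ht, pvCnt]
      | succ n => simp [pvKeep, ht, pvCnt]
    · simp [pvKeep, ht]
  | cons x ts ih =>
    by_cases hx : pvIsTag x = true
    · have hc : pvCnt (x :: ts) = pvCnt ts + 1 := by simp [pvCnt, List.filter, hx]
      cases n with
      | zero =>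
        simp only [List.cons_append, pvKeep, hx, if_pos rfl]
        rw [ih 0]
        have h1 : ¬ pvCnt ts < 0 := by omega
        have h2 : ¬ pvCnt (x :: ts) < 0 := by omega
        simp [h1, h2]
      | succ n =>
        simp only [List.cons_append, pvKeep, hx, if_pos rfl]
        rw [ih n]
        have : pvCnt (x :: ts) < n + 1 ↔ pvCnt ts < n := by omega
        simp [this]
    · have hc : pvCnt (x :: ts) = pvCnt ts := by simp [pvCnt, List.filter, hx]
      simp only [List.cons_append, pvKeep, hx]
      simp only [Bool.false_eq_true, if_false]
      rw [ih n, hc]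
      simp

-- the sum of the startswith indicators is the hashtag count
theorem pvSum (ts : List String) (acc : Int) :
    ts.foldl (fun acc t => acc + (if PySem.Str.startswith t "#" then 1 else 0)) acc
      = acc + (pvCnt ts : Int) := by
  induction ts generalizing acc with
  | nil => simp [pvCnt]
  | cons t ts ih =>
    by_cases ht : pvIsTag t = true
    · have ht' : PySem.Str.startswith t "#" = true := ht
      have hc : pvCnt (t :: ts) = pvCnt ts + 1 := by simp [pvCnt, List.filter, ht]
      simp only [List.foldl_cons, ht', if_pos rfl, ih, hc]
      push_cast; ring
    · have ht' : PySem.Str.startswith t "#" = false := by simpa [pvIsTag] using ht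
      have hc : pvCnt (t :: ts) = pvCnt ts := by simp [pvCnt, List.filter, ht]
      simp only [List.foldl_cons, ht', Bool.false_eq_true, if_false, ih, hc]
      ring

-- A's fold computes pvKeep
theorem pvFoldA (m : Int) (ts : List String) (acc : List String) (c : Int) :
    (ts.foldl
        (fun (s : List String × Int) token =>
          if PySem.Str.startswith token "#" then
            if s.2 < m then (s.1 ++ [token], s.2 + 1) else s
          else (s.1 ++ [token], s.2)) (acc, c)).1
      = acc ++ pvKeep ts (max (m - c) 0).toNat := by
  induction ts generalizing acc c with
  | nil => simp [pvKeep]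
  | cons t ts ih =>
    simp only [List.foldl_cons]
    by_cases ht : PySem.Str.startswith t "#" = true
    · rw [if_pos ht]
      have ht' : pvIsTag t = true := ht
      by_cases hc : c < m
      · rw [if_pos hc, ih]
        have hn : (max (m - c) 0).toNat = (max (m - (c + 1)) 0).toNat + 1 := by omega
        rw [hn]
        simp [pvKeep, ht']
      · rw [if_neg hc, ih]
        have hn : (max (m - c) 0).toNat = 0 := by omega
        rw [hn]
        simp [pvKeep, ht']
    · have ht' : pvIsTag t = false := by unfold pvIsTag; simpa using ht
      rw [if_neg ht, ih]
      simp [pvKeep, ht']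

-- B's reverse walk drops exactly the trailing excess hashtags
theorem pvRevFold (ts : List String) (e : Int) (out : List String) (he : 0 ≤ e) :
    ts.reverse.foldl
        (fun (s : Int × List String) t =>
          if s.1 ≠ 0 ∧ PySem.Str.startswith t "#" = true then (s.1 - 1, s.2)
          else (s.1, s.2 ++ [t])) (e, out)
      = (e - min e (pvCnt ts : Int), out ++ (pvKeep ts ((pvCnt ts : Int) - e).toNat).reverse) := by
  induction ts using List.reverseRecOn generalizing e out with
  | nil =>
    simp only [List.reverse_nil, List.foldl_nil]
    have h1 : min e ((pvCnt ([] : List String)) : Int) = 0 := by simp [pvCnt]; omega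
    have h2 : pvKeep [] (((pvCnt ([] : List String)) : Int) - e).toNat = [] := rfl
    rw [h1, h2]
    simp
  | append_singleton xs t ih =>
    rw [List.reverse_append, List.reverse_singleton, List.singleton_append, List.foldl_cons]
    by_cases ht : pvIsTag t = true
    · have ht' : PySem.Str.startswith t "#" = true := ht
      rw [pvCnt_snoc, if_pos ht]
      by_cases hz : e = 0
      · subst hz
        rw [if_neg (by simp), ih 0 (out ++ [t]) le_rfl]
        have h1 : ((pvCnt xs : Int) - 0).toNat = pvCnt xs := by omega
        have h2 : (((pvCnt xs + 1 : Nat) : Int) - 0).toNat = pvCnt xs + 1 := by omega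
        rw [h1, h2, pvKeep_all xs (pvCnt xs) le_rfl, pvKeep_snoc,
          if_pos ht, if_pos (by omega), pvKeep_all xs (pvCnt xs + 1) (by omega)]
        simp only [Prod.mk.injEq]
        exact ⟨by omega, by simp⟩
      · rw [if_pos ⟨hz, ht'⟩, ih (e - 1) out (by omega)]
        have h1 : ((pvCnt xs : Int) - (e - 1)).toNat = (((pvCnt xs + 1 : Nat) : Int) - e).toNat := by
          omega
        rw [h1, pvKeep_snoc, if_pos ht]
        have h2 : ¬ pvCnt xs < (((pvCnt xs + 1 : Nat) : Int) - e).toNat := by omega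
        rw [if_neg h2]
        simp only [Prod.mk.injEq]
        exact ⟨by omega, by simp⟩
    · have ht' : PySem.Str.startswith t "#" = false := by simpa [pvIsTag] using ht
      have hnc : ¬ (e ≠ 0 ∧ PySem.Str.startswith t "#" = true) := fun hcon => by
        rw [ht'] at hcon; exact Bool.false_ne_true hcon.2
      rw [pvCnt_snoc, if_neg hnc, ih e (out ++ [t]) he,
        pvKeep_snoc, if_neg (by simp [ht])]
      simp only [Prod.mk.injEq]
      exact ⟨by omega, by simp [ht]⟩

-- membership: pvKeep keeps only original tokens
theorem pvKeep_subset (ts : List String) (n : Nat) (w : String) (hw : w ∈ pvKeep ts n) : w ∈ ts := by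
  induction ts generalizing n with
  | nil => simp [pvKeep] at hw
  | cons t ts ih =>
    unfold pvKeep at hw
    split at hw
    · cases n with
      | zero => exact List.mem_cons_of_mem _ (ih 0 hw)
      | succ n =>
        rcases List.mem_cons.1 hw with h | h
        · simp [h]
        · exact List.mem_cons_of_mem _ (ih n h)
    · rcases List.mem_cons.1 hw with h | h
      · simp [h]
      · exact List.mem_cons_of_mem _ (ih n h)

-- a good token: nonempty, no whitespace
def pvGood (w : List Char) : Prop := w ≠ [] ∧ ∀ c ∈ w, PySem.Chars.isspace c = false

theorem pvSplit₀_go_good (s : List Char) : ∀ (cur : List Char) (acc : List (List Char)),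
    (∀ c ∈ cur, PySem.Chars.isspace c = false) → (∀ w ∈ acc, pvGood w) →
    ∀ w ∈ PySem.Chars.split₀.go s cur acc, pvGood w := by
  induction s with
  | nil =>
    intro cur acc hcur hacc w hw
    unfold PySem.Chars.split₀.go at hw
    by_cases hc : cur.isEmpty = true
    · rw [if_pos hc] at hw
      exact hacc w (by simpa using hw)
    · rw [if_neg hc] at hw
      rw [List.mem_reverse, List.mem_cons] at hw
      rcases hw with h | h
      · subst h
        refine ⟨?_, ?_⟩
        · intro hnil
          exact hc (by simp [List.reverse_eq_nil_iff.mp hnil])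
        · intro c hc'
          exact hcur c (List.mem_reverse.1 hc')
      · exact hacc w h
  | cons a s ih =>
    intro cur acc hcur hacc w hw
    unfold PySem.Chars.split₀.go at hw
    by_cases ha : PySem.Chars.isspace a = true
    · rw [if_pos ha] at hw
      by_cases hc : cur.isEmpty = true
      · rw [if_pos hc] at hw
        exact ih [] acc (by simp) hacc w hw
      · rw [if_neg hc] at hw
        refine ih [] _ (by simp) ?_ w hw
        intro v hv
        rw [List.mem_cons] at hv
        rcases hv with h | h
        · subst h
          refine ⟨?_, ?_⟩
          · intro hnil
            exact hc (by simp [List.reverse_eq_nil_iff.mp hnil])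
          · intro c hc'
            exact hcur c (List.mem_reverse.1 hc')
        · exact hacc v h
    · rw [if_neg ha] at hw
      refine ih (a :: cur) acc ?_ hacc w hw
      intro c hc'
      rw [List.mem_cons] at hc'
      rcases hc' with h | h
      · subst h
        simpa using ha
      · exact hcur c h

theorem pvSplit₀_good (s : List Char) (w : List Char) (hw : w ∈ PySem.Chars.split₀ s) : pvGood w :=
  pvSplit₀_go_good s [] [] (by simp) (by simp) w hw

-- head of a good join is non-space
theorem pvJoin_head (parts : List (List Char)) (hne : parts ≠ [])
    (hgood : ∀ w ∈ parts, pvGood w) :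
    ∃ c t, PySem.Chars.join [' '] parts = c :: t ∧ PySem.Chars.isspace c = false := by
  match parts with
  | [w] =>
    obtain ⟨hw, hcs⟩ := hgood w (by simp)
    rcases w with _ | ⟨c, t⟩
    · exact absurd rfl hw
    · exact ⟨c, t, by simp [PySem.Chars.join_singleton], hcs c (by simp)⟩
  | w :: v :: rest =>
    obtain ⟨hw, hcs⟩ := hgood w (by simp)
    rcases w with _ | ⟨c, t⟩
    · exact absurd rfl hw
    · refine ⟨c, t ++ [' '] ++ PySem.Chars.join [' '] (v :: rest), ?_, hcs c (by simp)⟩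
      rw [PySem.Chars.join_cons_cons]
      simp

-- last of a good join is non-space (stated on the reverse)
theorem pvJoin_last (parts : List (List Char)) (hne : parts ≠ [])
    (hgood : ∀ w ∈ parts, pvGood w) :
    ∃ c t, (PySem.Chars.join [' '] parts).reverse = c :: t ∧ PySem.Chars.isspace c = false := by
  induction parts with
  | nil => exact absurd rfl hne
  | cons w rest ih =>
    rcases rest with _ | ⟨v, rest'⟩
    · obtain ⟨hw, hcs⟩ := hgood w (by simp)
      rcases hr : w.reverse with _ | ⟨c, t⟩
      · exact absurd (by simpa using congrArg List.reverse hr) hw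
      · refine ⟨c, t, by simpa [PySem.Chars.join_singleton] using hr, ?_⟩
        apply hcs
        have : c ∈ w.reverse := by simp [hr]
        simpa using this
    · obtain ⟨c, t, hct, hc⟩ := ih (by simp) (fun u hu => hgood u (List.mem_cons_of_mem _ hu))
      refine ⟨c, t ++ (w ++ [' ']).reverse, ?_, hc⟩
      rw [PySem.Chars.join_cons_cons]
      have : w ++ [' '] ++ PySem.Chars.join [' '] (v :: rest') =
          (w ++ [' ']) ++ PySem.Chars.join [' '] (v :: rest') := by simp
      rw [this, List.reverse_append, hct]
      simp

-- strip is a no-op on a join of good tokens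
theorem pvStrip_join (parts : List (List Char)) (hgood : ∀ w ∈ parts, pvGood w) :
    PySem.Chars.strip (PySem.Chars.join [' '] parts) = PySem.Chars.join [' '] parts := by
  rcases hp : parts with _ | ⟨w, rest⟩
  · simp [PySem.Chars.join_nil, PySem.Chars.strip, PySem.Chars.lstrip, PySem.Chars.rstrip]
  · rw [← hp]
    have hne : parts ≠ [] := by simp [hp]
    obtain ⟨c, t, hct, hc⟩ := pvJoin_head parts hne hgood
    obtain ⟨d, u, hdu, hd⟩ := pvJoin_last parts hne hgood
    unfold PySem.Chars.strip PySem.Chars.lstrip PySem.Chars.rstrip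
    rw [hct, List.dropWhile_cons, hc]
    simp only [Bool.false_eq_true, if_false]
    rw [← hct, hdu, List.dropWhile_cons, hd]
    simp only [Bool.false_eq_true, if_false]
    rw [← hdu, List.reverse_reverse]

-- ===== VERDICT (by name: the statement is the Claim_ definition above) =====
theorem trim_hashtags_spec : Claim_equal_trim_hashtags := by
  intro text max_tags _
  unfold Spec_trim_hashtags
  simp only [trim_hashtags, trim_hashtags_alt]
  set ts := PySem.Str.split₀ text with hts
  have htot : ts.foldl (fun acc t => acc + (if PySem.Str.startswith t "#" then 1 else 0)) 0
      = (pvCnt ts : Int) := by rw [pvSum]; ring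
  have hlen : ((ts.filter (fun token => PySem.Str.startswith token "#")).length : Int)
      = (pvCnt ts : Int) := rfl
  by_cases hempty : text = ""
  · rw [if_pos hempty]
    have h0 : ts = [] := by rw [hts, hempty]; decide
    rw [htot, h0]
    have hc0 : (pvCnt ([] : List String) : Int) = 0 := by simp [pvCnt]
    rw [hc0]
    split_ifs with hm
    · exact hempty.symm
    · rfl
  · rw [if_neg hempty, htot]
    by_cases hle : (pvCnt ts : Int) ≤ max_tags
    · rw [if_pos (by rw [hlen]; exact hle), if_pos hle]
    · rw [if_neg (by rw [hlen]; exact hle), if_neg hle]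
      have he : 0 ≤ (pvCnt ts : Int) - max max_tags 0 := by omega
      rw [pvRevFold ts _ [] he]
      have hn : ((pvCnt ts : Int) - ((pvCnt ts : Int) - max max_tags 0)).toNat
          = (max max_tags 0).toNat := by omega
      simp only [List.nil_append, List.reverse_reverse, hn]
      have hA : (ts.foldl
          (fun (s : List String × Int) token =>
            if PySem.Str.startswith token "#" then
              if s.2 < max_tags then (s.1 ++ [token], s.2 + 1) else s
            else (s.1 ++ [token], s.2)) ([], 0)).1
          = pvKeep ts (max max_tags 0).toNat := by
        have harg : (max (max_tags - 0) 0).toNat = (max max_tags 0).toNat := by omega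
        rw [pvFoldA, harg, List.nil_append]
      rw [hA]
      -- strip is a no-op on A's side
      have hgood : ∀ w ∈ (pvKeep ts (max max_tags 0).toNat).map String.toList, pvGood w := by
        intro w hw
        rcases List.mem_map.1 hw with ⟨u, hu, rfl⟩
        have hu' : u ∈ ts := pvKeep_subset _ _ _ hu
        have : u.toList ∈ PySem.Chars.split₀ text.toList := by
          rw [← PySem.Str.split₀_map_toList]
          exact List.mem_map_of_mem hu'
        exact pvSplit₀_good _ _ this
      have hchars : (PySem.Str.strip (PySem.Str.join " " (pvKeep ts (max max_tags 0).toNat))).toList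
          = (PySem.Str.join " " (pvKeep ts (max max_tags 0).toNat)).toList := by
        rw [PySem.Str.toList_strip, PySem.Str.toList_join]
        exact pvStrip_join _ hgood
      calc PySem.Str.strip (PySem.Str.join " " (pvKeep ts (max max_tags 0).toNat))
          = String.ofList (PySem.Str.strip (PySem.Str.join " " (pvKeep ts (max max_tags 0).toNat))).toList := String.ofList_toList.symm
        _ = String.ofList (PySem.Str.join " " (pvKeep ts (max max_tags 0).toNat)).toList := by rw [hchars]
        _ = PySem.Str.join " " (pvKeep ts (max max_tags 0).toNat) := String.ofList_toList
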